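-- pv_equiv track=rewrite | github.com/cas1m1r/Neo | vuln_explorer.py | count_by_vendor
-- ===== SOURCE A (Python) =====
-- def count_by_vendor(cve_data):
--     h = {}
--     for val in cve_data['vendor']:
--         if val != 'nan':
--             if val not in h.keys():
--                 h[val] = 0
--             h[val] += 1
--     return h
-- ===== SOURCE B (Python) =====
-- def count_by_vendor(cve_data):
--     vals = [v for v in cve_data['vendor'] if v != 'nan']
--     h = {}
--     while vals:
--         v = vals[0]
--         rest = [x for x in vals if x != v]
--         h[v] = len(vals) - len(rest)
--         vals = rest
--     return h
-- ===== Notes on version B (the rewrite author's own statement) =====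
-- stated objective: alternative
-- what changed: Replaces A's single-pass dict accumulator (insert-0-then-increment per element) with a count-and-remove partition loop: repeatedly take the first remaining vendor, strip all its occurrences, and record the count as the drop in list length; no dict lookups or per-element increments remain.
import Mathlib
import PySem

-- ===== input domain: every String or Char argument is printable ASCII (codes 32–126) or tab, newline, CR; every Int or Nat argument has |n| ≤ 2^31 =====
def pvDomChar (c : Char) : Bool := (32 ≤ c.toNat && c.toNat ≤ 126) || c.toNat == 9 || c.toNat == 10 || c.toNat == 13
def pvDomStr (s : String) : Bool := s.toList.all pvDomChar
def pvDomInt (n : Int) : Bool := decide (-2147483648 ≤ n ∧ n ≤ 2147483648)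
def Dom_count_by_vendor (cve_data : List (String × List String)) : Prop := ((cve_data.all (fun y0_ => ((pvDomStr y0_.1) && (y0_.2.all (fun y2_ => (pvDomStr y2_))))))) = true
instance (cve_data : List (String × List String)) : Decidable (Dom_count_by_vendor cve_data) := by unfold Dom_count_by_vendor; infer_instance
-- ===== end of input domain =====

-- B replaces A's per-element dict accumulator with a count-and-remove partition loop
-- (take first vendor, strip its occurrences, count = drop in length): an alternative algorithm, same results.

-- ===== PORT A =====
-- A: h = {}; for val in cve_data['vendor']: if val != 'nan': (if val not in h.keys(): h[val] = 0); h[val] += 1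
def count_by_vendor (cve_data : List (String × List String)) : List (String × Int) :=
  match (PySem.Dict.ofList cve_data).get? "vendor" with
  | none => []   -- unreachable: Pre_ excludes the KeyError
  | some vendors =>
    (vendors.foldl (fun h val =>
      if val ≠ "nan" then
        let h := if val ∉ h.keys then h.insert val 0 else h
        h.insert val (h.getD val 0 + 1)        -- h[val] += 1
      else h) (PySem.Dict.empty : PySem.Dict String Int)).items

-- ===== PORT B =====
-- B's while loop as structural recursion on the shrinking list: take the first vendor v,
-- partition out all its occurrences, record len(vals) - len(rest), continue on rest.
-- The dict h gains each key exactly once (rest never contains v), so its items are these pairs in order (exact).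
def count_by_vendor_altGo (vals : List String) : List (String × Int) :=
  match vals with
  | [] => []
  | v :: tl =>
    let rest := (v :: tl).filter (fun x => x ≠ v)
    (v, ((v :: tl).length : Int) - (rest.length : Int)) :: count_by_vendor_altGo rest
termination_by vals.length
decreasing_by
  simp only [List.filter_cons, decide_not]
  have : (List.filter (fun x => !decide (x = v)) tl).length ≤ tl.length := List.length_filter_le _ _
  simp_all

def count_by_vendor_alt (cve_data : List (String × List String)) : List (String × Int) :=
  match (PySem.Dict.ofList cve_data).get? "vendor" with
  | none => []   -- unreachable: Pre_ excludes the KeyError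
  | some vendors =>
    count_by_vendor_altGo (vendors.filter (fun v => v ≠ "nan"))

-- ===== PRECONDITION & SPEC =====
-- A raises KeyError when 'vendor' is not a key of cve_data; exactly those inputs are excluded.
def Pre_count_by_vendor (cve_data : List (String × List String)) : Prop :=
  "vendor" ∈ cve_data.map Prod.fst
instance (cve_data : List (String × List String)) : Decidable (Pre_count_by_vendor cve_data) := by unfold Pre_count_by_vendor; infer_instance

def pvWitness_count_by_vendor : (List (String × List String)) := [("vendor", ["a", "nan", "b", "a"])]

def Spec_count_by_vendor (cve_data : List (String × List String)) (out : List (String × Int)) : Prop := out = count_by_vendor_alt cve_data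
instance (cve_data : List (String × List String)) (out : List (String × Int)) : Decidable (Spec_count_by_vendor cve_data out) := by unfold Spec_count_by_vendor; infer_instance

-- ===== CLAIM (what is proved, stated in full; the proofs are below) =====
def Claim_equal_count_by_vendor : Prop := ∀ (cve_data : List (String × List String)), Dom_count_by_vendor cve_data → Pre_count_by_vendor cve_data → Spec_count_by_vendor cve_data (count_by_vendor cve_data)

-- ===== LEMMAS AND PROOFS =====

-- A's loop body (insert 0 when absent, then += 1) is the Counter insert step.
theorem count_step_eq (h : PySem.Dict String Int) (val : String) :
    (if val ≠ "nan" then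
        let h' := if val ∉ h.keys then h.insert val 0 else h
        h'.insert val (h'.getD val 0 + 1)
      else h)
      = (if val ≠ "nan" then h.insert val (h.getD val 0 + 1) else h) := by
  by_cases hn : val ≠ "nan"
  · by_cases hm : val ∈ h.keys
    · simp [hm]
    · have hc : h.contains val = false := by
        rw [← Bool.not_eq_true, PySem.Dict.contains_iff_mem_keys]; exact hm
      simp [hm, PySem.Dict.insert_insert_self, PySem.Dict.getD_insert_self,
        PySem.Dict.getD_of_not_contains h (0 : Int) hc]
  · simp [hn]

-- A's whole fold equals Counter of the nan-filtered list.
theorem count_fold_eq_counter (vendors : List String) :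
    vendors.foldl (fun h val =>
        if val ≠ "nan" then
          let h' := if val ∉ h.keys then h.insert val 0 else h
          h'.insert val (h'.getD val 0 + 1)
        else h) (PySem.Dict.empty : PySem.Dict String Int)
      = PySem.Dict.counter (vendors.filter (fun v => v ≠ "nan")) := by
  have hstep : (fun (h : PySem.Dict String Int) val =>
      if val ≠ "nan" then
        let h' := if val ∉ h.keys then h.insert val 0 else h
        h'.insert val (h'.getD val 0 + 1)
      else h) = (fun h val => if val ≠ "nan" then h.insert val (h.getD val 0 + 1) else h) := by
    funext h val; exact count_step_eq h val
  rw [hstep, ← PySem.Dict.foldl_insert_getD_add_one_eq_counter, List.foldl_filter]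
  simp

theorem ofList_fold_filter (v : String) (acc : PySem.Set String) (hv : v ∈ acc) (l : List String) :
    l.foldl PySem.Set.add acc = (l.filter (fun x => x ≠ v)).foldl PySem.Set.add acc := by
  induction l generalizing acc with
  | nil => rfl
  | cons x tl ih =>
    by_cases hx : x = v
    · subst hx
      have hthis : PySem.Set.add acc x = acc := by
        simp [PySem.Set.add, PySem.Set.contains, hv]
      simp only [List.filter_cons]
      rw [if_neg (by simp)]
      simp only [List.foldl_cons, hthis]
      exact ih acc hv
    · have hv' : v ∈ PySem.Set.add acc x := by
        simp only [PySem.Set.add]; split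
        · exact hv
        · exact List.mem_append_left _ hv
      simp only [List.filter_cons, List.foldl_cons]
      rw [if_pos (by simpa using hx)]
      simp only [List.foldl_cons]
      exact ih _ hv'

theorem foldl_add_head (v : String) (l : List String) (h : ∀ x ∈ l, x ≠ v) (acc : List String) :
    l.foldl PySem.Set.add (v :: acc) = v :: l.foldl PySem.Set.add acc := by
  induction l generalizing acc with
  | nil => rfl
  | cons x tl ih =>
    have hx : x ≠ v := h x (by simp)
    have hstep : PySem.Set.add (v :: acc) x = v :: PySem.Set.add acc x := by
      have hc : (v :: acc).contains x = acc.contains x := by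
        simp [List.contains_eq_mem, hx]
      simp only [PySem.Set.add, PySem.Set.contains, hc]
      split <;> simp
    rw [List.foldl_cons, hstep, ih (fun y hy => h y (by simp [hy])), List.foldl_cons]

theorem dedup_cons_filter (v : String) (tl : List String) :
    PySem.List.dedup (v :: tl) = v :: PySem.List.dedup (tl.filter (fun x => x ≠ v)) := by
  have h1 : PySem.List.dedup (v :: tl) = tl.foldl PySem.Set.add [v] := by
    simp [PySem.List.dedup, PySem.Set.ofList, PySem.Set.add, PySem.Set.empty, PySem.Set.contains]
  rw [h1, ofList_fold_filter v [v] (by simp) tl]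
  have h2 := foldl_add_head v (tl.filter (fun x => x ≠ v))
    (fun x hx => by simpa using (List.mem_filter.mp hx).2) []
  simpa [PySem.List.dedup, PySem.Set.ofList, PySem.Set.empty] using h2

theorem altGo_eq_dedup_count (vals : List String) :
    count_by_vendor_altGo vals
      = (PySem.List.dedup vals).map (fun v => (v, (vals.count v : Int))) := by
  induction vals using count_by_vendor_altGo.induct with
  | case1 => simp [count_by_vendor_altGo]
  | case2 v tl rest ih =>
    have hrest : rest = tl.filter (fun x => x ≠ v) := by
      simp [rest]
    have hlen : ((v :: tl).length : Int) - (rest.length : Int) = ((v :: tl).count v : Int) := by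
      have h1 : (v :: tl).length
          = List.countP (fun x => x == v) (v :: tl)
            + List.countP (fun a => !(a == v)) (v :: tl) := by
        simpa using List.length_eq_countP_add_countP (fun x => x == v) (l := v :: tl)
      have h2 : rest.length = List.countP (fun a => !(a == v)) (v :: tl) := by
        rw [← List.countP_eq_length_filter]
        apply List.countP_congr
        intro a _
        simp [ne_eq]
      have h3 : (v :: tl).count v = List.countP (fun x => x == v) (v :: tl) :=
        List.count_eq_countP
      omega
    simp only [count_by_vendor_altGo]
    rw [ih, dedup_cons_filter, ← hrest, List.map_cons, hlen]
    congr 1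
    apply List.map_congr_left
    intro w hw
    have hwmem : w ∈ rest := (PySem.List.mem_dedup _ _).mp hw
    have hwne : w ≠ v := by
      rw [hrest] at hwmem; simpa using (List.mem_filter.mp hwmem).2
    have hcount : rest.count w = (v :: tl).count w := by
      have : rest = (v :: tl).filter (fun x => x ≠ v) := rfl
      rw [this, List.count_filter (by simp [hwne])]
    simp [hcount]

theorem count_by_vendor_spec : Claim_equal_count_by_vendor := by
  intro cve_data _ _
  unfold Spec_count_by_vendor count_by_vendor count_by_vendor_alt
  cases (PySem.Dict.ofList cve_data).get? "vendor" with
  | none => rfl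
  | some vendors =>
    simp only [count_fold_eq_counter, PySem.Dict.items_counter, altGo_eq_dedup_count,
      PySem.List.dedup_eq_ofList]
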